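-- pv_equiv track=rewrite | github.com/captainbarmaley/Learn | Python/4bit-summator.py | add_4bit
-- ===== SOURCE A (Python) =====
-- def full_adder(a, b, carry_in):
--     sum = (a ^ b) ^ carry_in
--     carry_out = (a & b) | (carry_in & (a ^ b))
--     return sum, carry_out
--
-- def add_4bit(a, b):
--     result = 0 # here result of operation
--     carry = 0
--
--     for i in range(4): # 4bit: 0, 1, 2, 3
--         # Get 'i'bit from 'a' and 'b'
--         a_bit = (a >> i) & 1
--         b_bit = (b >> i) & 1
--
--         sum_bit, carry = full_adder(a_bit, b_bit, carry)
--
--         # Put sum_bit in 'i' position of 'result'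
--         result |= (sum_bit << i)
--
--     result |= (carry << 4) # add newline in 5bit
--     return result, carry
-- ===== SOURCE B (Python) =====
-- def add_4bit(a, b):
--     # Closed form: add the low nibbles; bit 4 of the sum is the carry,
--     # and A's packed result (sum bits | carry<<4) is exactly that total.
--     total = a % 16 + b % 16
--     return total, total >> 4
-- ===== Notes on version B (the rewrite author's own statement) =====
-- stated objective: simpler
-- what changed: Replaced the 4-iteration full-adder bit loop with a closed-form computation: total = a%16 + b%16, returning (total, total>>4).
import Mathlib
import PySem

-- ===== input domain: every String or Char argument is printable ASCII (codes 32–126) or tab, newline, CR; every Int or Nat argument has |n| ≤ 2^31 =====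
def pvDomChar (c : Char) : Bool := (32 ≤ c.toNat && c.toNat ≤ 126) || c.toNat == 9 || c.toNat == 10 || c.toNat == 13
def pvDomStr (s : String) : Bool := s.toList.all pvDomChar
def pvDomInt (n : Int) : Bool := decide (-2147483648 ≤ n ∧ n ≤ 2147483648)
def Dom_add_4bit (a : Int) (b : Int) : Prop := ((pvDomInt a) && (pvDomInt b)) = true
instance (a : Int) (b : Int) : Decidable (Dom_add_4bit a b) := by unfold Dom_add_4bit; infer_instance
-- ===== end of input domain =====

-- B replaces A's 4-iteration full-adder bit loop with the closed form
-- total = a%16 + b%16, carry = total >> 4 (simpler; same return value).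


-- ===== PORT A =====
def full_adder (a : Int) (b : Int) (carry_in : Int) : Int × Int :=
  let sum := PySem.Int.bxor (PySem.Int.bxor a b) carry_in
  let carry_out := PySem.Int.bor (PySem.Int.band a b)
      (PySem.Int.band carry_in (PySem.Int.bxor a b))
  (sum, carry_out)

-- loop 'for i in range(4)' over state (result, carry); i ∈ [0,4) so 'i.toNat' is exact
def add_4bit (a : Int) (b : Int) : Int × Int :=
  let rc := (PySem.List.pyRange 0 4 1).foldl (fun (st : Int × Int) (i : Int) =>
      let result := st.1
      let carry := st.2
      let a_bit := PySem.Int.band (a >>> i.toNat) 1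
      let b_bit := PySem.Int.band (b >>> i.toNat) 1
      let sc := full_adder a_bit b_bit carry
      (PySem.Int.bor result (sc.1 <<< i.toNat), sc.2)) (0, 0)
  (PySem.Int.bor rc.1 (rc.2 <<< 4), rc.2)

-- ===== PORT B =====
def add_4bit_alt (a : Int) (b : Int) : Int × Int :=
  let total := PySem.Int.mod a 16 + PySem.Int.mod b 16
  (total, total >>> 4)

-- ===== PRECONDITION & SPEC =====
def Spec_add_4bit (a : Int) (b : Int) (out : Int × Int) : Prop := out = add_4bit_alt a b
instance (a : Int) (b : Int) (out : Int × Int) : Decidable (Spec_add_4bit a b out) := by unfold Spec_add_4bit; infer_instance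

-- ===== CLAIM (what is proved, stated in full; the proofs are below) =====
def Claim_equal_add_4bit : Prop := ∀ (a : Int) (b : Int), Dom_add_4bit a b → Spec_add_4bit a b (add_4bit a b)

-- ===== LEMMAS AND PROOFS =====

-- Python's mod (fmod) with positive modulus is Lean's emod.
theorem pymod_eq_emod (x : Int) (m : Int) (hm : 0 ≤ m) : PySem.Int.mod x m = x % m := by
  simp [PySem.Int.mod, Int.fmod_eq_emod, hm]

-- bit i of x equals bit i of x % 16, for i < 4
theorem bit_mod16 (x : Int) (i : Nat) (hi : i < 4) :
    PySem.Int.band (x >>> i) 1 = PySem.Int.band ((x % 16) >>> i) 1 := by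
  rw [PySem.Int.band_one, PySem.Int.band_one,
      pymod_eq_emod _ 2 (by norm_num), pymod_eq_emod _ 2 (by norm_num),
      Int.shiftRight_eq_div_pow, Int.shiftRight_eq_div_pow]
  interval_cases i <;> push_cast <;> omega

-- A depends only on the low nibbles
theorem add_4bit_mod (a b : Int) : add_4bit a b = add_4bit (a % 16) (b % 16) := by
  simp only [add_4bit, show PySem.List.pyRange 0 4 1 = [0,1,2,3] from rfl, List.foldl,
      Int.toNat_zero, Int.toNat_one,
      show Int.toNat 2 = 2 from rfl, show Int.toNat 3 = 3 from rfl]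
  rw [bit_mod16 a 0 (by norm_num), bit_mod16 b 0 (by norm_num),
      bit_mod16 a 1 (by norm_num), bit_mod16 b 1 (by norm_num),
      bit_mod16 a 2 (by norm_num), bit_mod16 b 2 (by norm_num),
      bit_mod16 a 3 (by norm_num), bit_mod16 b 3 (by norm_num)]

-- B depends only on the low nibbles
theorem add_4bit_alt_mod (a b : Int) : add_4bit_alt a b = add_4bit_alt (a % 16) (b % 16) := by
  simp only [add_4bit_alt, pymod_eq_emod _ 16 (by norm_num)]
  rw [Int.emod_emod_of_dvd a (dvd_refl 16), Int.emod_emod_of_dvd b (dvd_refl 16)]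

-- the 256 nibble cases, checked by computation
theorem main16 : ∀ r : Nat, r < 16 → ∀ s : Nat, s < 16 →
    add_4bit (r : Int) (s : Int) = add_4bit_alt (r : Int) (s : Int) := by decide

-- ===== VERDICT (by name: the statement is the Claim_ definition above) =====
theorem add_4bit_spec : Claim_equal_add_4bit := by
  intro a b _
  unfold Spec_add_4bit
  rw [add_4bit_mod, add_4bit_alt_mod]
  have ha0 : 0 ≤ a % 16 := Int.emod_nonneg a (by norm_num)
  have ha1 : a % 16 < 16 := Int.emod_lt_of_pos a (by norm_num)
  have hb0 : 0 ≤ b % 16 := Int.emod_nonneg b (by norm_num)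
  have hb1 : b % 16 < 16 := Int.emod_lt_of_pos b (by norm_num)
  have := main16 (a % 16).toNat (by omega) (b % 16).toNat (by omega)
  rwa [Int.toNat_of_nonneg ha0, Int.toNat_of_nonneg hb0] at this
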